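-- pv_equiv track=rewrite | github.com/DavidVossebuerger/EW-Livev2 | EW_Backtester.py | sanitize_symbol
-- ===== SOURCE A (Python) =====
-- def sanitize_symbol(sym: str) -> str:
--     """Ersetze Dateisystem-kritische Zeichen in Symbolen für Dateinamen.
--     Beispiel: '^GSPC' -> 'GSPC', 'EURUSD=X' -> 'EURUSD_X'
--     """
--     if not sym:
--         return 'UNKNOWN'
--     # Entferne führendes '^'
--     s = sym.strip()
--     if s.startswith('^'):
--         s = s[1:]
--     repl = {':':'-', '/':'-', '\\':'-', '*':'x', '?':'', '"':'', '<':'', '>':'', '|':'-', '=':'_', ' ':'_', ';':'-'}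
--     out = []
--     for ch in s:
--         out.append(repl.get(ch, ch))
--     cleaned = ''.join(out)
--     # Doppelte Unterstriche reduzieren
--     while '__' in cleaned:
--         cleaned = cleaned.replace('__','_')
--     return cleaned.strip('_') or 'SYMBOL'
-- ===== SOURCE B (Python) =====
-- _TABLE = str.maketrans({':': '-', '/': '-', '\\': '-', '*': 'x', '?': '', '"': '',
--                         '<': '', '>': '', '|': '-', '=': '_', ' ': '_', ';': '-'})
--
--
-- def sanitize_symbol(sym: str) -> str:
--     """Wie das Original, aber: translate statt dict-Schleife und ein einziger
--     split/filter/join statt wiederholtem replace('__','_') plus strip('_')."""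
--     if not sym:
--         return 'UNKNOWN'
--     s = sym.strip()
--     if s.startswith('^'):
--         s = s[1:]
--     cleaned = s.translate(_TABLE)
--     result = '_'.join(p for p in cleaned.split('_') if p)
--     return result or 'SYMBOL'
-- ===== Notes on version B (the rewrite author's own statement) =====
-- stated objective: faster
-- what changed: The per-character dict lookup loop becomes str.translate, and the repeated whole-string double-underscore replace loop plus the trailing underscore strip are replaced by a single split/filter/join pass that collapses and trims separators in one traversal.
import Mathlib
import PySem

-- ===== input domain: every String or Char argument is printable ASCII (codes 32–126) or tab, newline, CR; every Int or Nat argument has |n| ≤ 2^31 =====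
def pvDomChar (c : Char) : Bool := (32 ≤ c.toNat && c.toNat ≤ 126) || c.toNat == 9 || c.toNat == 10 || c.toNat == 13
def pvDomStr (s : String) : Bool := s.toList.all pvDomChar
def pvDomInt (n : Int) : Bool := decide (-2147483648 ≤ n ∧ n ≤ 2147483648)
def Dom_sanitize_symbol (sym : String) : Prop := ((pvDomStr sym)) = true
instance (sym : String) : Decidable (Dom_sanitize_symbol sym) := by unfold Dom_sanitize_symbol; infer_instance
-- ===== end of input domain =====

-- B replaces the per-character dict lookup loop by str.translate and the repeated
-- double-underscore replace loop plus the trailing strip by one split/filter/join pass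
-- (measured faster at large sizes); same return value on every input.

-- ===== PORT A =====
-- helpers needed by the port itself: the termination of the `while '__' in cleaned` loop
-- (replace shortens the string whenever '__' occurs).
def collapse1 : List Char → List Char
  | '_' :: '_' :: t => '_' :: collapse1 t
  | c :: t => c :: collapse1 t
  | [] => []

lemma collapse1_uu (t : List Char) : collapse1 ('_' :: '_' :: t) = '_' :: collapse1 t := rfl

lemma collapse1_cons {c : Char} {t : List Char} (h : ¬ ['_','_'].isPrefixOf (c :: t) = true) :
    collapse1 (c :: t) = c :: collapse1 t := by
  rw [collapse1.eq_def]
  split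
  · rename_i heq; rw [heq] at h; simp [List.isPrefixOf] at h
  · rename_i heq; cases heq; rfl
  · rename_i heq; simp at heq

lemma replace_go_eq (fuel : Nat) (l acc : List Char) (h : l.length ≤ fuel) :
    PySem.Chars.replace.go ['_','_'] ['_'] fuel l acc = acc.reverse ++ collapse1 l := by
  induction fuel generalizing l acc with
  | zero =>
    have : l = [] := by cases l <;> simp_all
    subst this; simp [PySem.Chars.replace.go, collapse1]
  | succ f ih =>
    cases l with
    | nil => simp [PySem.Chars.replace.go, collapse1]
    | cons c t =>
      rw [PySem.Chars.replace.go]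
      by_cases hp : ['_','_'].isPrefixOf (c :: t) = true
      · have hc : c = '_' ∧ ∃ t', t = '_' :: t' := by
          cases t with
          | nil => simp [List.isPrefixOf] at hp
          | cons d t' =>
            simp [List.isPrefixOf] at hp
            obtain ⟨h1, h2⟩ := hp
            exact ⟨h1.symm, t', by rw [← h2]⟩
        obtain ⟨rfl, t', rfl⟩ := hc
        simp only [hp, if_pos]
        rw [ih]
        · simp [collapse1_uu]
        · simp at h ⊢; omega
      · simp only [hp, if_neg, Bool.not_eq_true]
        rw [ih _ _ (by simp at h ⊢; omega), collapse1_cons hp]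
        simp

lemma replace_eq_collapse1 (l : List Char) :
    PySem.Chars.replace l ['_','_'] ['_'] = collapse1 l := by
  rw [PySem.Chars.replace]
  simp [replace_go_eq l.length l [] le_rfl]


lemma guard_not_prefix {c : Char} {t : List Char}
    (h : ∀ (t1 : List Char), c = '_' → t = '_' :: t1 → False) :
    ¬ ['_','_'].isPrefixOf (c :: t) = true := by
  intro hp
  cases t with
  | nil => simp [List.isPrefixOf] at hp
  | cons d t' =>
    simp [List.isPrefixOf] at hp
    obtain ⟨h1, h2⟩ := hp
    exact h t' h1.symm (by rw [← h2])

lemma collapse1_length_le (l : List Char) : (collapse1 l).length ≤ l.length := by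
  induction l using collapse1.induct with
  | case1 t ih => simp [collapse1_uu]; omega
  | case2 c t h ih =>
    rw [collapse1_cons (guard_not_prefix h)]
    simp
    omega
  | case3 => simp [collapse1]

lemma collapse1_length_lt {l : List Char} (h : ['_','_'] <:+: l) :
    (collapse1 l).length < l.length := by
  induction l using collapse1.induct with
  | case1 t ih =>
    have := collapse1_length_le t
    simp [collapse1_uu]; omega
  | case2 c t hg ih =>
    rw [collapse1_cons (guard_not_prefix hg)]
    rcases List.infix_cons_iff.mp h with hpre | hinf
    · exact absurd (List.isPrefixOf_iff_prefix.mpr hpre) (guard_not_prefix hg)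
    · have := ih hinf
      simp; omega
  | case3 => simp at h

def collapseLoop (cs : List Char) : List Char :=
  if PySem.Chars.isIn ['_','_'] cs = true then
    collapseLoop (PySem.Chars.replace cs ['_','_'] ['_'])
  else cs
termination_by cs.length
decreasing_by
  rw [replace_eq_collapse1]
  exact collapse1_length_lt (((PySem.Chars.isIn_iff_infix _ _).mp (by assumption)))


-- repl = {':':'-', '/':'-', '\\':'-', '*':'x', '?':'', '"':'', '<':'', '>':'', '|':'-', '=':'_', ' ':'_', ';':'-'}
def replA : PySem.Dict Char (List Char) :=
  ⟨[(':', ['-']), ('/', ['-']), ('\\', ['-']), ('*', ['x']), ('?', []), ('"', []),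
    ('<', []), ('>', []), ('|', ['-']), ('=', ['_']), (' ', ['_']), (';', ['-'])]⟩

def sanitize_symbol (sym : String) : String :=
  if PySem.Str.len sym = 0 then "UNKNOWN"
  else
    let s0 := PySem.Chars.strip sym.toList
    let s1 := if PySem.Chars.startswith s0 ['^'] then PySem.List.slice s0 (some 1) none else s0
    let out := s1.foldl (fun acc ch => acc ++ [replA.getD ch [ch]]) ([] : List (List Char))
    let cleaned := PySem.Chars.join [] out
    let cleaned2 := collapseLoop cleaned
    let r := PySem.Chars.stripChars cleaned2 ['_']
    if r = [] then "SYMBOL" else String.mk r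

-- ===== PORT B =====
-- _TABLE = str.maketrans({...}); s.translate(_TABLE) maps each char to its replacement (possibly empty)
def tableB (c : Char) : List Char :=
  if c = ':' then ['-'] else if c = '/' then ['-'] else if c = '\\' then ['-']
  else if c = '*' then ['x'] else if c = '?' then [] else if c = '"' then []
  else if c = '<' then [] else if c = '>' then [] else if c = '|' then ['-']
  else if c = '=' then ['_'] else if c = ' ' then ['_'] else if c = ';' then ['-']
  else [c]

def sanitize_symbol_alt (sym : String) : String :=
  if PySem.Str.len sym = 0 then "UNKNOWN"
  else
    let s0 := PySem.Chars.strip sym.toList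
    let s1 := if PySem.Chars.startswith s0 ['^'] then PySem.List.slice s0 (some 1) none else s0
    let cleaned := s1.flatMap tableB
    let res := PySem.Chars.join ['_'] ((PySem.Chars.splitOn cleaned ['_']).filter (fun p => !p.isEmpty))
    if res = [] then "SYMBOL" else String.mk res

-- ===== PRECONDITION & SPEC =====
def Spec_sanitize_symbol (sym : String) (out : String) : Prop := out = sanitize_symbol_alt sym
instance (sym : String) (out : String) : Decidable (Spec_sanitize_symbol sym out) := by unfold Spec_sanitize_symbol; infer_instance

-- ===== CLAIM (what is proved, stated in full; the proofs are below) =====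
def Claim_equal_sanitize_symbol : Prop := ∀ (sym : String), Dom_sanitize_symbol sym → Spec_sanitize_symbol sym (sanitize_symbol sym)

-- ===== LEMMAS AND PROOFS =====
-- Python split('_') as a simple structural recursion
def pysplit : List Char → List (List Char)
  | [] => [[]]
  | '_' :: t => [] :: pysplit t
  | c :: t => (pysplit t).modifyHead (c :: ·)

lemma pysplit_cons_ne {c : Char} (hc : ¬ c = '_') (t : List Char) :
    pysplit (c :: t) = (pysplit t).modifyHead (c :: ·) := by
  rw [pysplit.eq_def]; split
  · rename_i heq; simp at heq
  · rename_i heq; cases heq; simp at hc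
  · rename_i heq; cases heq; rfl

lemma pysplit_ne_nil (l : List Char) : pysplit l ≠ [] := by
  induction l with
  | nil => simp [pysplit]
  | cons c t ih =>
    by_cases hc : c = '_'
    · subst hc; simp [pysplit]
    · rw [pysplit_cons_ne hc, Ne, ← List.length_eq_zero_iff, List.length_modifyHead,
        List.length_eq_zero_iff]
      exact ih

lemma splitOn_go_eq (fuel : Nat) (l cur : List Char) (acc : List (List Char))
    (h : l.length < fuel) :
    PySem.Chars.splitOn.go ['_'] fuel l cur acc =
      acc.reverse ++ (pysplit l).modifyHead (cur.reverse ++ ·) := by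
  induction fuel generalizing l cur acc with
  | zero => omega
  | succ f ih =>
    cases l with
    | nil => simp [PySem.Chars.splitOn.go, pysplit]
    | cons c t =>
      rw [PySem.Chars.splitOn.go]
      by_cases hc : c = '_'
      · subst hc
        have hp : (['_'].isPrefixOf ('_' :: t)) = true := by simp [List.isPrefixOf]
        simp only [hp, if_pos]
        rw [ih _ _ _ (by simp at h ⊢; omega)]
        obtain ⟨p, ps, hps⟩ := List.exists_cons_of_ne_nil (pysplit_ne_nil t)
        simp [pysplit, hps]
      · have hp : (['_'].isPrefixOf (c :: t)) = false := by
          simp [List.isPrefixOf]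
          exact fun hh => absurd hh.symm hc
        simp only [hp, Bool.false_eq_true, if_neg, not_false_iff]
        rw [ih _ _ _ (by simp at h ⊢; omega), pysplit_cons_ne hc]
        obtain ⟨p, ps, hps⟩ := List.exists_cons_of_ne_nil (pysplit_ne_nil t)
        simp [hps]

lemma splitOn_eq_pysplit (l : List Char) :
    PySem.Chars.splitOn l ['_'] = pysplit l := by
  rw [PySem.Chars.splitOn, splitOn_go_eq _ _ _ _ (by omega)]
  obtain ⟨p, ps, hps⟩ := List.exists_cons_of_ne_nil (pysplit_ne_nil l)
  simp [hps]

-- full collapse of underscore runs, pairwise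
def canon2 : List Char → List Char
  | [] => []
  | [c] => [c]
  | c1 :: c2 :: t => if c1 = '_' ∧ c2 = '_' then canon2 (c2 :: t) else c1 :: canon2 (c2 :: t)

def gU (y : List Char) : List Char := if y.head? = some '_' then y else '_' :: y

lemma canon2_cons2 (c1 c2 : Char) (t : List Char) :
    canon2 (c1 :: c2 :: t) = if c1 = '_' ∧ c2 = '_' then canon2 (c2 :: t) else c1 :: canon2 (c2 :: t) := rfl

lemma canon2_head : ∀ (t : List Char) (c : Char), (canon2 (c :: t)).head? = some c := by
  intro t
  induction t with
  | nil => intro c; simp [canon2]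
  | cons c2 t' ih =>
    intro c
    rw [canon2_cons2]
    split_ifs with h
    · rw [ih c2, h.1, h.2]
    · simp

lemma canon2_cons (c : Char) (t : List Char) :
    canon2 (c :: t) = if c = '_' then gU (canon2 t) else c :: canon2 t := by
  cases t with
  | nil => by_cases h : c = '_' <;> simp [canon2, gU, h]
  | cons c2 t' =>
    rw [canon2_cons2]
    by_cases h : c = '_'
    · by_cases h2 : c2 = '_'
      · simp only [h, h2, and_self, if_pos]
        rw [gU, canon2_head t' '_']
        simp
      · have : ¬ (c = '_' ∧ c2 = '_') := by tauto
        simp only [this, if_neg, h, if_pos]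
        rw [gU, canon2_head t' c2]
        simp [h2]
    · have : ¬ (c = '_' ∧ c2 = '_') := by tauto
      simp [h]

lemma canon2_collapse1 (l : List Char) : canon2 (collapse1 l) = canon2 l := by
  induction l using collapse1.induct with
  | case1 t ih =>
    rw [collapse1_uu, canon2_cons, if_pos rfl, ih, canon2_cons2, if_pos ⟨rfl, rfl⟩,
      canon2_cons, if_pos rfl]
  | case2 c t hg ih =>
    rw [collapse1_cons (guard_not_prefix hg), canon2_cons, canon2_cons, ih]
  | case3 => rfl

lemma canon2_of_no_dd {l : List Char} (h : ¬ ['_','_'] <:+: l) : canon2 l = l := by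
  induction l with
  | nil => rfl
  | cons c t ih =>
    have hnt : ¬ ['_','_'] <:+: t := fun hh => h (List.infix_cons_iff.mpr (Or.inr hh))
    rw [canon2_cons, ih hnt]
    split_ifs with hc
    · subst hc
      cases t with
      | nil => rfl
      | cons d t' =>
        have hd : ¬ d = '_' := by
          intro hd; subst hd
          exact h (List.infix_cons_iff.mpr (Or.inl (by simp)))
        rw [gU]; simp [hd]
    · rfl

lemma collapseLoop_eq_canon2 (cs : List Char) : collapseLoop cs = canon2 cs := by
  induction cs using collapseLoop.induct with
  | case1 cs hin ih =>
    rw [collapseLoop, if_pos hin, ih, replace_eq_collapse1, canon2_collapse1]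
  | case2 cs hin =>
    rw [collapseLoop, if_neg hin, canon2_of_no_dd (((PySem.Chars.isIn_eq_false_iff _ _)).mp (by simpa using hin))]

-- underscore predicate used by strip('_')
def pU (c : Char) : Bool := ['_'].contains c

def rsU (x : List Char) : List Char := (List.dropWhile pU x.reverse).reverse

lemma pU_underscore : pU '_' = true := rfl

lemma rsU_cons_ne {c : Char} (hc : ¬ c = '_') (x : List Char) : rsU (c :: x) = c :: rsU x := by
  by_cases hh : List.dropWhile pU x.reverse = []
  · simp [rsU, List.dropWhile_append, hh, List.dropWhile, pU, hc]
  · simp [rsU, List.dropWhile_append, hh]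

lemma rsU_cons_u (x : List Char) : rsU ('_' :: x) = if rsU x = [] then [] else '_' :: rsU x := by
  by_cases hh : List.dropWhile pU x.reverse = []
  · simp [rsU, List.dropWhile_append, hh, List.dropWhile, pU]
  · simp [rsU, List.dropWhile_append, hh]

def partsNE (cs : List Char) : List (List Char) := (pysplit cs).filter (fun p => !p.isEmpty)

def Epart (cs : List Char) : List Char :=
  if partsNE cs = [] then []
  else (if cs.head? = some '_' then ['_'] else []) ++ List.intercalate ['_'] (partsNE cs)

lemma inter_cons (x : List Char) (r : List (List Char)) :
    List.intercalate ['_'] (x :: r) = x ++ (if r = [] then [] else '_' :: List.intercalate ['_'] r) := by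
  cases r with
  | nil => simp [List.intercalate]
  | cons y r' => simp [List.intercalate, List.intersperse]

lemma partsNE_cons_u (t : List Char) : partsNE ('_' :: t) = partsNE t := by
  simp [partsNE, pysplit]

lemma E2 {t h : List Char} {tl : List (List Char)} (hp : pysplit t = h :: tl) :
    Epart t = List.intercalate ['_'] (h :: tl.filter (fun p => !p.isEmpty)) := by
  cases t with
  | nil =>
    rw [pysplit] at hp
    cases hp
    simp [Epart, partsNE, pysplit, List.intercalate]
  | cons c t2 =>
    by_cases hc : c = '_'
    · subst hc
      rw [pysplit] at hp
      cases hp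
      rw [Epart, partsNE_cons_u, inter_cons]
      by_cases hf : (pysplit t2).filter (fun p => !p.isEmpty) = []
      · simp [partsNE, hf]
      · simp [partsNE, hf]
    · rw [pysplit_cons_ne hc] at hp
      obtain ⟨h', tl2, hp'⟩ := List.exists_cons_of_ne_nil (pysplit_ne_nil t2)
      rw [hp'] at hp
      simp only [List.modifyHead] at hp
      injection hp with hA hB
      subst hA
      subst hB
      have hps : pysplit (c :: t2) = (c :: h') :: tl2 := by
        rw [pysplit_cons_ne hc, hp']; rfl
      rw [Epart, partsNE, hps]
      rw [if_neg (by simp [List.filter])]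
      simp only [List.head?]
      rw [if_neg (by simp [hc])]
      simp [List.filter]

lemma Epart_ne_nil_of_head {c : Char} {t : List Char} (hc : ¬ c = '_') :
    Epart (c :: t) ≠ [] := by
  obtain ⟨h', tl', hp'⟩ := List.exists_cons_of_ne_nil (pysplit_ne_nil t)
  rw [E2 (by rw [pysplit_cons_ne hc, hp']; rfl), inter_cons]
  simp

lemma rsU_canon2 (cs : List Char) : rsU (canon2 cs) = Epart cs := by
  induction cs with
  | nil => simp [canon2, rsU, Epart, partsNE, pysplit]
  | cons c t ih =>
    rw [canon2_cons]
    by_cases hc : c = '_'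
    · subst hc
      rw [if_pos rfl]
      cases t with
      | nil => decide
      | cons c2 t' =>
        by_cases h2 : c2 = '_'
        · subst h2
          rw [gU, canon2_head t' '_', if_pos rfl, ih]
          simp only [Epart, partsNE_cons_u]
          simp
        · rw [gU, if_neg (by rw [canon2_head t' c2]; simp [h2]), rsU_cons_u, ih]
          have hEp : Epart (c2 :: t') ≠ [] := Epart_ne_nil_of_head h2
          rw [if_neg hEp]
          obtain ⟨h', tl', hp'⟩ := List.exists_cons_of_ne_nil (pysplit_ne_nil t')
          have hps : pysplit (c2 :: t') = (c2 :: h') :: tl' := by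
            rw [pysplit_cons_ne h2, hp']; rfl
          have hpartsne : partsNE (c2 :: t') ≠ [] := by
            rw [partsNE, hps]; simp [List.filter]
          rw [Epart, if_neg hpartsne]
          simp only [List.head?]
          rw [Epart, partsNE_cons_u, if_neg hpartsne]
          simp [h2]
    · rw [if_neg hc, rsU_cons_ne hc, ih]
      obtain ⟨h', tl', hp'⟩ := List.exists_cons_of_ne_nil (pysplit_ne_nil t)
      rw [E2 hp']
      have hps : pysplit (c :: t) = (c :: h') :: tl' := by
        rw [pysplit_cons_ne hc, hp']; rfl
      have hpartsne : partsNE (c :: t) ≠ [] := by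
        rw [partsNE, hps]; simp [List.filter]
      rw [Epart, if_neg hpartsne, partsNE, hps]
      simp only [List.filter, List.isEmpty_cons, Bool.not_false, List.head?]
      rw [if_neg (by simp [hc])]
      rw [inter_cons, inter_cons]
      by_cases hf : tl'.filter (fun p => !p.isEmpty) = [] <;> simp [hf]

lemma dropWhile_gU (y : List Char) : List.dropWhile pU (gU y) = List.dropWhile pU y := by
  rw [gU]
  split_ifs with h
  · rfl
  · simp [List.dropWhile, pU]

lemma lstrip_canon2 (cs : List Char) :
    List.dropWhile pU (canon2 cs) = canon2 (List.dropWhile pU cs) := by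
  induction cs with
  | nil => rfl
  | cons c t ih =>
    rw [canon2_cons]
    by_cases hc : c = '_'
    · subst hc
      rw [if_pos rfl, dropWhile_gU, ih]
      simp [List.dropWhile, pU]
    · rw [if_neg hc]
      have hpc : pU c = false := by simp [pU, hc]
      simp only [List.dropWhile, hpc]
      rw [canon2_cons, if_neg hc]

lemma partsNE_dropWhile (cs : List Char) :
    partsNE (List.dropWhile pU cs) = partsNE cs := by
  induction cs with
  | nil => rfl
  | cons c t ih =>
    by_cases hc : c = '_'
    · subst hc
      simp only [List.dropWhile, pU_underscore]
      rw [ih, partsNE_cons_u]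
    · have hpc : pU c = false := by simp [pU, hc]
      simp only [List.dropWhile, hpc]

lemma head_dropWhile_ne_u (cs : List Char) :
    ¬ (List.dropWhile pU cs).head? = some '_' := by
  induction cs with
  | nil => simp
  | cons c t ih =>
    by_cases hc : pU c = true
    · simp only [List.dropWhile, hc]; exact ih
    · simp only [List.dropWhile, hc]
      simp only [Bool.not_eq_true] at hc
      intro hh
      simp only [List.head?, Option.some_inj] at hh
      rw [hh] at hc
      simp [pU] at hc

lemma strip_canon2 (cs : List Char) :
    PySem.Chars.stripChars (canon2 cs) ['_'] = List.intercalate ['_'] (partsNE cs) := by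
  show rsU (List.dropWhile pU (canon2 cs)) = _
  rw [lstrip_canon2, rsU_canon2, Epart]
  split_ifs with h1 h2
  · rw [← partsNE_dropWhile cs, h1]
    simp [List.intercalate]
  · exact absurd h2 (head_dropWhile_ne_u cs)
  · rw [partsNE_dropWhile]
    simp

lemma pipeline (cleaned : List Char) :
    PySem.Chars.stripChars (collapseLoop cleaned) ['_'] =
      PySem.Chars.join ['_'] ((PySem.Chars.splitOn cleaned ['_']).filter (fun p => !p.isEmpty)) := by
  rw [collapseLoop_eq_canon2, strip_canon2, splitOn_eq_pysplit]
  rfl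

lemma join_nil_eq_flatten (parts : List (List Char)) :
    PySem.Chars.join [] parts = parts.flatten := by
  induction parts with
  | nil => rfl
  | cons x r ih =>
    show List.intercalate [] (x :: r) = _
    cases r with
    | nil => simp [List.intercalate]
    | cons y r' =>
      show (x :: ([] : List Char) :: List.intersperse [] (y :: r')).flatten = _
      simp only [List.flatten_cons, List.nil_append]
      have ih' : (List.intersperse ([] : List Char) (y :: r')).flatten = (y :: r').flatten := ih
      rw [ih']
      rfl

lemma repl_table (c : Char) : replA.getD c [c] = tableB c := by
  by_cases h0 : c = ':'
  · subst h0; rfl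
  by_cases h1 : c = '/'
  · subst h1; rfl
  by_cases h2 : c = '\\'
  · subst h2; rfl
  by_cases h3 : c = '*'
  · subst h3; rfl
  by_cases h4 : c = '?'
  · subst h4; rfl
  by_cases h5 : c = '"'
  · subst h5; rfl
  by_cases h6 : c = '<'
  · subst h6; rfl
  by_cases h7 : c = '>'
  · subst h7; rfl
  by_cases h8 : c = '|'
  · subst h8; rfl
  by_cases h9 : c = '='
  · subst h9; rfl
  by_cases h10 : c = ' '
  · subst h10; rfl
  by_cases h11 : c = ';'
  · subst h11; rfl
  have e0 : (':' == c) = false := beq_eq_false_iff_ne.mpr (fun e => h0 e.symm)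
  have e1 : ('/' == c) = false := beq_eq_false_iff_ne.mpr (fun e => h1 e.symm)
  have e2 : ('\\' == c) = false := beq_eq_false_iff_ne.mpr (fun e => h2 e.symm)
  have e3 : ('*' == c) = false := beq_eq_false_iff_ne.mpr (fun e => h3 e.symm)
  have e4 : ('?' == c) = false := beq_eq_false_iff_ne.mpr (fun e => h4 e.symm)
  have e5 : ('"' == c) = false := beq_eq_false_iff_ne.mpr (fun e => h5 e.symm)
  have e6 : ('<' == c) = false := beq_eq_false_iff_ne.mpr (fun e => h6 e.symm)
  have e7 : ('>' == c) = false := beq_eq_false_iff_ne.mpr (fun e => h7 e.symm)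
  have e8 : ('|' == c) = false := beq_eq_false_iff_ne.mpr (fun e => h8 e.symm)
  have e9 : ('=' == c) = false := beq_eq_false_iff_ne.mpr (fun e => h9 e.symm)
  have e10 : (' ' == c) = false := beq_eq_false_iff_ne.mpr (fun e => h10 e.symm)
  have e11 : (';' == c) = false := beq_eq_false_iff_ne.mpr (fun e => h11 e.symm)
  simp only [replA, PySem.Dict.getD, PySem.Dict.get?, List.find?, e0, e1, e2, e3, e4, e5, e6, e7, e8, e9, e10, e11]
  simp [tableB, h0, h1, h2, h3, h4, h5, h6, h7, h8, h9, h10, h11]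

lemma cleaned_eq (s1 : List Char) :
    PySem.Chars.join [] (s1.foldl (fun acc ch => acc ++ [replA.getD ch [ch]]) ([] : List (List Char))) =
      s1.flatMap tableB := by
  rw [PySem.List.foldl_append_singleton_eq_map, join_nil_eq_flatten, List.flatMap_def]
  simp only [List.nil_append]
  congr 1
  exact List.map_congr_left (fun ch _ => repl_table ch)

-- ===== VERDICT (by name: the statement is the Claim_ definition above) =====
theorem sanitize_symbol_spec : Claim_equal_sanitize_symbol := by
  intro sym _hdom
  show sanitize_symbol sym = sanitize_symbol_alt sym
  rw [sanitize_symbol, sanitize_symbol_alt]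
  by_cases h : PySem.Str.len sym = 0
  · rw [if_pos h, if_pos h]
  · rw [if_neg h, if_neg h]
    simp only []
    rw [cleaned_eq, pipeline]
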